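-- pv_equiv track=rewrite | github.com/ViraKrajevskiy/Python-tasks | 18/117.py | array_117
-- ===== SOURCE A (Python) =====
-- def array_117(array):
--     result = []
--     previous_value = None
--
--     for element in array:
--         if element != previous_value:
--             result.append(0)
--         result.append(element)
--         previous_value = element
--
--     return result
-- ===== SOURCE B (Python) =====
-- def array_117(array):
--     # run-based: for each maximal run of equal consecutive elements, emit 0 then the run
--     result = []
--     i = 0
--     n = len(array)
--     while i < n:
--         j = i + 1
--         while j < n and array[j] == array[i]:
--             j += 1
--         result.append(0)
--         result.extend(array[i:j])
--         i = j
--     return result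
-- ===== Notes on version B (the rewrite author's own statement) =====
-- stated objective: alternative
-- what changed: Replaces the per-element loop with a previous_value sentinel by a run decomposition: an outer loop scans each maximal run of equal consecutive elements and emits a zero followed by the whole run slice.
import Mathlib
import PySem

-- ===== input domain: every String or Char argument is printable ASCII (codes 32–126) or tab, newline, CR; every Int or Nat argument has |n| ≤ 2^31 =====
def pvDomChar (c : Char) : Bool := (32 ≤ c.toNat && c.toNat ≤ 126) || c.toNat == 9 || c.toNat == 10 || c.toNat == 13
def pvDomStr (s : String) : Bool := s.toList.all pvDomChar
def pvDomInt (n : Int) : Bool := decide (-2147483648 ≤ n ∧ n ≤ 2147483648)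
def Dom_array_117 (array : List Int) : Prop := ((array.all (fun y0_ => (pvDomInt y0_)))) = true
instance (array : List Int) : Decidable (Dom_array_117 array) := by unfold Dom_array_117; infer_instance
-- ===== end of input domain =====

-- B replaces A's per-element loop with a previous_value sentinel by a recursive
-- decomposition into maximal runs of equal consecutive elements (alternative, same cost).


-- ===== PORT A =====
-- state: (result, previous_value); previous_value starts as None
def array_117 (array : List Int) : List Int :=
  (array.foldl
    (fun (st : List Int × Option Int) element =>
      let result := if (some element ≠ st.2) then st.1 ++ [0] else st.1
      (result ++ [element], some element))
    ([], none)).1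

-- ===== PORT B =====
-- length of the maximal run of elements equal to x at the front of the list
def pvRunLen (x : Int) : List Int → Nat
  | [] => 0
  | y :: ys => if y = x then pvRunLen x ys + 1 else 0

def array_117_alt : List Int → List Int
  | [] => []
  | x :: xs =>
    let r := pvRunLen x xs
    0 :: x :: (xs.take r ++ array_117_alt (xs.drop r))
termination_by l => l.length
decreasing_by simp [List.length_drop]

-- ===== PRECONDITION & SPEC =====
def Spec_array_117 (array : List Int) (out : List Int) : Prop := out = array_117_alt array
instance (array : List Int) (out : List Int) : Decidable (Spec_array_117 array out) := by unfold Spec_array_117; infer_instance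

-- ===== CLAIM (what is proved, stated in full; the proofs are below) =====
def Claim_equal_array_117 : Prop := ∀ (array : List Int), Dom_array_117 array → Spec_array_117 array (array_117 array)

-- ===== LEMMAS AND PROOFS =====

-- abstract description of A's loop, parameterised by the previous value
def pvG (p : Option Int) : List Int → List Int
  | [] => []
  | x :: xs => (if (some x ≠ p) then [0] else []) ++ x :: pvG (some x) xs

theorem pvFoldl_eq_pvG (xs : List Int) (acc : List Int) (p : Option Int) :
    (xs.foldl
      (fun (st : List Int × Option Int) element =>
        let result := if (some element ≠ st.2) then st.1 ++ [0] else st.1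
        (result ++ [element], some element))
      (acc, p)).1 = acc ++ pvG p xs := by
  induction xs generalizing acc p with
  | nil => simp [pvG]
  | cons x xs ih =>
    simp only [List.foldl_cons, pvG, ih]
    by_cases h : (some x ≠ p) <;> simp [h]

theorem pvG_some (x : Int) (xs : List Int) :
    pvG (some x) xs = xs.take (pvRunLen x xs) ++ pvG none (xs.drop (pvRunLen x xs)) := by
  induction xs generalizing x with
  | nil => simp [pvG, pvRunLen]
  | cons y ys ih =>
    by_cases h : y = x
    · subst h
      simp [pvG, pvRunLen, ih y]
    · simp [pvG, pvRunLen, h]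

theorem pvG_none_eq_alt (xs : List Int) : pvG none xs = array_117_alt xs := by
  induction xs using array_117_alt.induct with
  | case1 => simp [pvG, array_117_alt]
  | case2 x xs r ih =>
    simp only [pvG, pvG_some, array_117_alt, r] at *
    simp [ih]

-- ===== VERDICT (by name: the statement is the Claim_ definition above) =====
theorem array_117_spec : Claim_equal_array_117 := by
  intro array _
  unfold Spec_array_117 array_117
  rw [pvFoldl_eq_pvG, pvG_none_eq_alt]
  simp
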